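-- pv_equiv track=rewrite | github.com/bobrenjc93/pytorch | torch/fx/experimental/_symbolic_shapes_utils.py | _eval_is_non_overlapping_and_dense
-- ===== SOURCE A (Python) =====
-- import operator
-- from collections.abc import Callable, Generator, Iterator, Mapping, Sequence
--
-- def _eval_is_non_overlapping_and_dense(
--     sizes: Sequence[int], strides: Sequence[int]
-- ) -> bool:
--     """
--     Evaluates whether a tensor with the given sizes and strides is non-overlapping and dense.
--
--     A tensor is non-overlapping if there's no memory location that belongs to more than one element.
--     A tensor is dense if all elements are stored in memory without gaps.
--
--     Args:
--         sizes: Sequence of dimension sizes for the tensor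
--         strides: Sequence of strides for the tensor
--
--     Returns:
--         True if the tensor is non-overlapping and dense, False otherwise
--     """
--     dim = len(sizes)
--
--     # Short-circuits for tensors of rank one, which are
--     # non-overlapping and "dense" if their stride is one
--     # or it is a 0/1 element tensor
--     if dim == 1:
--         return strides[0] == 1 or sizes[0] < 2
--
--     # Checks that there exists a permutation of the strides s.t. the tensor would be contiguous
--     # Sorts (length, stride) pairs by stride
--     lengths_and_strides = sorted(zip(sizes, strides), key=operator.itemgetter(1))
--
--     # Unlike the C++ code, we don't move the 0/1 size dimensions to the
--     # end.  So we have to keep going for this code.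
--     expected_stride = 1
--     for length, stride in lengths_and_strides:
--         if length == 1:
--             continue
--
--         if stride != expected_stride:
--             return False
--
--         expected_stride *= length
--
--     return True
-- ===== SOURCE B (Python) =====
-- def _eval_is_non_overlapping_and_dense(sizes, strides):
--     dim = len(sizes)
--
--     if dim == 1:
--         return strides[0] == 1 or sizes[0] < 2
--
--     # Index the size>1 (more precisely size != 1) dimensions by stride.
--     # A repeated stride among such dimensions always means "not contiguous".
--     table = {}
--     for length, stride in zip(sizes, strides):
--         if length == 1:
--             continue
--         if stride in table:
--             return False
--         table[stride] = length
--
--     # Follow the contiguity chain of expected strides; it must consume the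
--     # whole table, with strictly growing strides while entries remain.
--     expected = 1
--     while expected in table:
--         length = table.pop(expected)
--         nxt = expected * length
--         if table and nxt <= expected:
--             return False
--         expected = nxt
--     return not table
-- ===== Notes on version B (the rewrite author's own statement) =====
-- stated objective: faster
-- what changed: Replaces sorting the (size, stride) pairs and scanning them in stride order by building a stride-keyed dict of the size!=1 dimensions (early False on a repeated stride) and following the expected-stride chain through the dict until it is exhausted.
import Mathlib
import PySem

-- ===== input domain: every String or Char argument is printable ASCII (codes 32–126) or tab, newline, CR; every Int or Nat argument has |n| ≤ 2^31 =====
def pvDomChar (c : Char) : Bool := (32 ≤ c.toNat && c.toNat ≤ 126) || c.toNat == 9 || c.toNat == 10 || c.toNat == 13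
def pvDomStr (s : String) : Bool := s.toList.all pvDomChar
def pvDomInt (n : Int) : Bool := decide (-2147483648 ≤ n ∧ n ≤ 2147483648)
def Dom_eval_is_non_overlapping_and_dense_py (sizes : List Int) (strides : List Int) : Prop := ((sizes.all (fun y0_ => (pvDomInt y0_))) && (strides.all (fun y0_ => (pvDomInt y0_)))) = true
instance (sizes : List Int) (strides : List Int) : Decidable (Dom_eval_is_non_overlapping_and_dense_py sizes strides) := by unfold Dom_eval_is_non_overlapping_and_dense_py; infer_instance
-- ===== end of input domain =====

-- B replaces A's sort-then-scan by a stride-keyed dict whose contiguity chain is followed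
-- directly, avoiding the sort (objective: faster); return values proved equal on Pre_.

-- ===== PORT A =====
-- the 'for length, stride in lengths_and_strides' loop of A
def pyScanA : List (Int × Int) → Int → Bool
  | [], _ => true
  | (length, stride) :: rest, expected =>
    if length = 1 then pyScanA rest expected
    else if stride ≠ expected then false
    else pyScanA rest (expected * length)

def eval_is_non_overlapping_and_dense_py (sizes : List Int) (strides : List Int) : Bool :=
  if sizes.length = 1 then
    -- Python raises IndexError when strides is empty here; Pre_ excludes that
    match PySem.List.pyGet? strides 0, PySem.List.pyGet? sizes 0 with
    | some st0, some sz0 => (st0 == 1) || decide (sz0 < 2)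
    | _, _ => false
  else
    pyScanA (PySem.List.sorted (sizes.zip strides) (fun p => p.2) false) 1

-- ===== PORT B =====
-- B's first loop: index the size≠1 dimensions by stride; none = early 'return False' on a repeat
def pyBuildTable : List (Int × Int) → PySem.Dict Int Int → Option (PySem.Dict Int Int)
  | [], table => some table
  | (length, stride) :: rest, table =>
    if length = 1 then pyBuildTable rest table
    else if table.contains stride then none
    else pyBuildTable rest (table.insert stride length)

-- termination of the while loop: popping a present key shrinks the table
theorem pyChase_size_lt {table : PySem.Dict Int Int} {e l : Int}
    (h : table.get? e = some l) : (table.erase e).size < table.size := by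
  simp only [PySem.Dict.get?, PySem.Dict.erase, PySem.Dict.size] at *
  have hex : ∃ p ∈ table.items, (p.1 == e) = true := by
    rcases Option.map_eq_some_iff.mp h with ⟨p, hp, _⟩
    exact ⟨p, List.mem_of_find?_eq_some hp, List.find?_some (p := fun q : Int × Int => q.1 == e) hp⟩
  rcases hex with ⟨p, hpmem, hpe⟩
  refine List.length_filter_lt_length_iff_exists.mpr ⟨p, hpmem, ?_⟩
  simp [hpe]

-- B's second loop: 'while expected in table: …' followed by 'return not table'
def pyChase (table : PySem.Dict Int Int) (expected : Int) : Bool :=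
  match h : table.get? expected with
  | some length =>
    let t' := table.erase expected
    let nxt := expected * length
    if t'.size ≠ 0 ∧ nxt ≤ expected then false
    else pyChase t' nxt
  | none => table.size == 0
termination_by table.size
decreasing_by exact pyChase_size_lt h

def eval_is_non_overlapping_and_dense_py_alt (sizes : List Int) (strides : List Int) : Bool :=
  if sizes.length = 1 then
    -- same short-circuit as A: strides[0] == 1 or sizes[0] < 2 (IndexError excluded by Pre_)
    match PySem.List.pyGet? strides 0 with
    | none => false
    | some st0 =>
      (st0 == 1) ||
        (match PySem.List.pyGet? sizes 0 with
         | some sz0 => decide (sz0 < 2)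
         | none => false)
  else
    match pyBuildTable (sizes.zip strides) PySem.Dict.empty with
    | none => false
    | some table => pyChase table 1

-- ===== PRECONDITION & SPEC =====
-- Pre_ excludes exactly the inputs where A raises IndexError: a single size with no stride.
def Pre_eval_is_non_overlapping_and_dense_py (sizes : List Int) (strides : List Int) : Prop :=
  sizes.length = 1 → strides ≠ []
instance (sizes : List Int) (strides : List Int) : Decidable (Pre_eval_is_non_overlapping_and_dense_py sizes strides) := by unfold Pre_eval_is_non_overlapping_and_dense_py; infer_instance

def pvWitness_eval_is_non_overlapping_and_dense_py : List Int × List Int := ([2, 3], [3, 1])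

def Spec_eval_is_non_overlapping_and_dense_py (sizes : List Int) (strides : List Int) (out : Bool) : Prop := out = eval_is_non_overlapping_and_dense_py_alt sizes strides
instance (sizes : List Int) (strides : List Int) (out : Bool) : Decidable (Spec_eval_is_non_overlapping_and_dense_py sizes strides out) := by unfold Spec_eval_is_non_overlapping_and_dense_py; infer_instance

-- ===== CLAIM (what is proved, stated in full; the proofs are below) =====
def Claim_equal_eval_is_non_overlapping_and_dense_py : Prop := ∀ (sizes : List Int) (strides : List Int), Dom_eval_is_non_overlapping_and_dense_py sizes strides → Pre_eval_is_non_overlapping_and_dense_py sizes strides → Spec_eval_is_non_overlapping_and_dense_py sizes strides (eval_is_non_overlapping_and_dense_py sizes strides)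

-- ===== LEMMAS AND PROOFS =====

-- scan with the size-1 skip = plain scan of the filtered list
def scanF : List (Int × Int) → Int → Bool
  | [], _ => true
  | (l, s) :: rest, e => if s ≠ e then false else scanF rest (e * l)

theorem pyScanA_eq_scanF (L : List (Int × Int)) (e : Int) :
    pyScanA L e = scanF (L.filter (fun p => p.1 != 1)) e := by
  induction L generalizing e with
  | nil => rfl
  | cons p rest ih =>
    obtain ⟨l, s⟩ := p
    by_cases hl : l = 1
    · simp [pyScanA, hl, ih]
    · by_cases hs : s ≠ e
      · simp [pyScanA, hl, hs, scanF]
      · simp [pyScanA, hl, hs, scanF, ih]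

-- characterisation of B's table-building loop
theorem pyBuildTable_none_iff (L : List (Int × Int)) : ∀ (table : PySem.Dict Int Int),
    table.keys.Nodup →
    (pyBuildTable L table = none ↔
      ¬ (table.keys ++ (L.filter (fun p => p.1 != 1)).map (·.2)).Nodup) := by
  induction L with
  | nil => intro table hnd; simp [pyBuildTable, hnd]
  | cons p rest ih =>
    intro table hnd
    obtain ⟨l, s⟩ := p
    by_cases hl : l = 1
    · simpa [pyBuildTable, hl] using ih table hnd
    · by_cases hc : table.contains s = true
      · have hmem : s ∈ table.keys := (PySem.Dict.contains_iff_mem_keys table s).mp hc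
        have hnn : ¬ (table.keys ++ s :: (rest.filter (fun p => p.1 != 1)).map (·.2)).Nodup :=
          fun hnd2 => (List.disjoint_of_nodup_append hnd2) hmem List.mem_cons_self
        simp [pyBuildTable, hl, hc, hnn]
      · have hns : s ∉ table.keys := fun h => hc ((PySem.Dict.contains_iff_mem_keys table s).mpr h)
        have hkeys : (table.insert s l).keys = table.keys ++ [s] :=
          PySem.Dict.keys_insert_of_not_contains table l (by simpa using hc)
        have hnd' : (table.insert s l).keys.Nodup := by
          rw [hkeys]
          simp only [List.nodup_append, List.nodup_singleton, hnd, true_and]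
          intro a ha b hb
          simp only [List.mem_singleton] at hb
          subst hb
          exact fun heq => hns (heq ▸ ha)
        have := ih (table.insert s l) hnd'
        rw [hkeys] at this
        simp only [pyBuildTable, hl, hc, if_false, List.filter_cons]
        simp only [bne_iff_ne, ne_eq, hl, not_false_eq_true, if_true, List.map_cons,
          List.append_assoc, List.singleton_append] at this ⊢
        simpa using this

theorem pyBuildTable_some_items (L : List (Int × Int)) : ∀ (table t : PySem.Dict Int Int),
    pyBuildTable L table = some t →
    t.items = table.items ++ (L.filter (fun p => p.1 != 1)).map (fun p => (p.2, p.1)) := by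
  induction L with
  | nil => intro table t h; simp [pyBuildTable] at h; simp [h]
  | cons p rest ih =>
    intro table t h
    obtain ⟨l, s⟩ := p
    by_cases hl : l = 1
    · simp only [pyBuildTable, hl, if_true] at h
      simpa [List.filter_cons, hl] using ih table t h
    · by_cases hc : table.contains s = true
      · simp [pyBuildTable, hl, hc] at h
      · simp only [pyBuildTable, hl, hc, if_false] at h
        have := ih (table.insert s l) t h
        rw [PySem.Dict.items_insert_of_not_contains table l (by simpa using hc)] at this
        simp [hl, this]

-- the chain-follower is stuck (returns false) when the minimal stride present is not expected
-- get? as a fact about items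
theorem dict_get?_eq_some {d : PySem.Dict Int Int} {e l : Int} (h : d.get? e = some l) :
    (e, l) ∈ d.items := by
  simp only [PySem.Dict.get?] at h
  rcases Option.map_eq_some_iff.mp h with ⟨p, hp, hv⟩
  have hk : (p.1 == e) = true := List.find?_some (p := fun q : Int × Int => q.1 == e) hp
  have hmem := List.mem_of_find?_eq_some hp
  have : p = (e, l) := by
    obtain ⟨a, b⟩ := p
    simp only at hv
    simp only [beq_iff_eq] at hk
    simp [hk, hv]
  exact this ▸ hmem

theorem dict_get?_none_of_not_mem {d : PySem.Dict Int Int} {e : Int}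
    (h : e ∉ d.items.map (·.1)) : d.get? e = none := by
  simp only [PySem.Dict.get?, Option.map_eq_none_iff, List.find?_eq_none]
  intro p hp
  simp only [beq_iff_eq]
  exact fun hpe => h (List.mem_map.mpr ⟨p, hp, hpe⟩)

theorem pyChase_stuck (n : Nat) : ∀ (d : PySem.Dict Int Int) (e s₀ : Int), d.size = n →
    s₀ ∈ d.items.map (·.1) → (∀ p ∈ d.items, s₀ ≤ p.1) → e ≠ s₀ → pyChase d e = false := by
  induction n using Nat.strong_induction_on with
  | _ n ih =>
    intro d e s₀ hsz hmem hmin hne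
    rcases List.mem_map.mp hmem with ⟨p₀, hp₀, hp₀k⟩
    rw [pyChase.eq_def]
    cases hg : d.get? e with
    | none =>
      simp only []
      have : d.items ≠ [] := List.ne_nil_of_mem hp₀
      simpa [PySem.Dict.size] using List.length_pos_of_ne_nil this |>.ne'
    | some l =>
      simp only []
      have hel : (e, l) ∈ d.items := dict_get?_eq_some hg
      have hse : s₀ < e := lt_of_le_of_ne (by simpa using hmin _ hel) (fun h : s₀ = e => hne h.symm)
      have hp₀' : p₀ ∈ (d.erase e).items := by
        simp only [PySem.Dict.erase]
        refine List.mem_filter.mpr ⟨hp₀, ?_⟩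
        simp [hp₀k, hse.ne]
      have hsz' : (d.erase e).size ≠ 0 := by
        simpa [PySem.Dict.size] using List.length_pos_of_ne_nil (List.ne_nil_of_mem hp₀') |>.ne'
      by_cases hle : e * l ≤ e
      · simp [hsz', hle]
      · have hrec : pyChase (d.erase e) (e * l) = false := by
          refine ih (d.erase e).size ?_ _ _ s₀ rfl ?_ ?_ ?_
          · rw [← hsz]; exact pyChase_size_lt hg
          · exact List.mem_map.mpr ⟨p₀, hp₀', hp₀k⟩
          · intro p hp
            exact hmin p (List.mem_of_mem_filter hp)
          · have : e < e * l := lt_of_not_ge hle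
            exact fun h => absurd (h ▸ (hse.trans this)) (lt_irrefl _)
        simp [hle, hrec]

-- the chain-follower only depends on the table as a finite map
theorem pyChase_perm (n : Nat) : ∀ (d d' : PySem.Dict Int Int) (e : Int), d.size = n →
    d.items.Perm d'.items → (d.items.map (·.1)).Nodup → pyChase d e = pyChase d' e := by
  induction n using Nat.strong_induction_on with
  | _ n ih =>
    intro d d' e hsz hperm hnd
    have hlen : d.items.length = d'.items.length := hperm.length_eq
    rw [pyChase.eq_def, pyChase.eq_def]
    split
    next l hg =>
      have he : (e, l) ∈ d.items := dict_get?_eq_some hg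
      have hnd' : (d'.items.map (·.1)).Nodup := ((hperm.map (·.1)).nodup_iff).mp hnd
      have hg' : d'.get? e = some l :=
        PySem.Dict.get?_of_mem_items d' (hperm.mem_iff.mp he) hnd'
      split
      next l' hgl' =>
        have hll : l' = l := by rw [hg'] at hgl'; exact (Option.some_inj.mp hgl').symm
        subst hll
        have hpermE : (d.erase e).items.Perm (d'.erase e).items := hperm.filter _
        have hndE : ((d.erase e).items.map (·.1)).Nodup := by
          simp only [PySem.Dict.erase]
          exact hnd.sublist (List.Sublist.map (fun p : Int × Int => p.1) List.filter_sublist)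
        have hsz2 : (d.erase e).size = (d'.erase e).size := by
          simp [PySem.Dict.size, hpermE.length_eq]
        dsimp only
        rw [hsz2]
        by_cases hc : ((d'.erase e).size ≠ 0 ∧ e * l' ≤ e)
        · simp [hc]
        · simp only [hc, if_false]
          exact ih (d.erase e).size (hsz ▸ pyChase_size_lt hg) _ _ _ rfl hpermE hndE
      next hgn => simp [hg'] at hgn
    next hg =>
      have hfind : d.items.find? (fun q => q.1 == e) = none := by
        simpa only [PySem.Dict.get?, Option.map_eq_none_iff] using hg
      have hnm : e ∉ d.items.map (·.1) := by
        intro hmem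
        rcases List.mem_map.mp hmem with ⟨p, hp, hpk⟩
        have hsome : (d.items.find? (fun q : Int × Int => q.1 == e)).isSome :=
          List.find?_isSome.mpr ⟨p, hp, by simp [hpk]⟩
        rw [hfind] at hsome
        simp at hsome
      have hg' : d'.get? e = none :=
        dict_get?_none_of_not_mem (fun h => hnm ((hperm.map (·.1)).mem_iff.mpr h))
      split
      next l' hgl' => simp [hg'] at hgl'
      next _ => simp [PySem.Dict.size, hlen]

-- the core: on a stride-sorted list of size≠1 dimensions, A's scan = duplicate test + chain chase
theorem scanF_eq_chase (n : Nat) : ∀ (F : List (Int × Int)) (e : Int), F.length = n →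
    F.Pairwise (fun a b => a.2 ≤ b.2) → (∀ p ∈ F, p.1 ≠ 1) → (∀ p ∈ F, p.2 = 0 → e = 1) →
    scanF F e = if (F.map (·.2)).Nodup
      then pyChase (PySem.Dict.mk (F.map (fun p => (p.2, p.1)))) e else false := by
  induction n using Nat.strong_induction_on with
  | _ n ih =>
    intro F e hlen hpw hl1 h0
    match F with
    | [] =>
      rw [pyChase.eq_def]
      simp [scanF, PySem.Dict.get?, PySem.Dict.size]
    | (l₀, s₀) :: F' =>
      rw [List.pairwise_cons] at hpw
      obtain ⟨hmin, hpw'⟩ := hpw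
      have hl₀ : l₀ ≠ 1 := hl1 (l₀, s₀) (List.mem_cons_self)
      by_cases hse : s₀ = e
      · subst hse
        by_cases hdup : s₀ ∈ F'.map (·.2)
        · rw [if_neg (by simp [hdup])]
          simp only [scanF, ne_eq, not_true_eq_false, if_false]
          match F' with
          | [] => simp at hdup
          | (l₁, s₁) :: F'' =>
            have h1 : s₀ ≤ s₁ := by simpa using hmin (l₁, s₁) (by simp)
            have hs₁ : s₁ = s₀ := by
              rcases List.mem_map.mp hdup with ⟨q, hq, hq2⟩
              rcases List.mem_cons.mp hq with hq | hq
              · rw [hq] at hq2; exact le_antisymm (hq2 ▸ h1) (le_of_eq hq2.symm) |>.symm ▸ hq2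
              · have h2 : s₁ ≤ q.2 := by
                  rw [List.pairwise_cons] at hpw'
                  simpa using hpw'.1 q hq
                exact le_antisymm (hq2 ▸ h2) h1
            have hne : s₁ ≠ s₀ * l₀ := by
              rw [hs₁]
              intro h
              rcases mul_eq_zero.mp (by linarith : s₀ * (l₀ - 1) = 0) with h' | h'
              · have := h0 (l₀, s₀) (by simp) (by simpa using h')
                omega
              · exact hl₀ (by omega)
            simp [scanF, hne]
        · have hget : (PySem.Dict.mk ((s₀, l₀) :: F'.map (fun p => (p.2, p.1)))).get? s₀
              = some l₀ := by
            simp [PySem.Dict.get?, List.find?]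
          have herase : (PySem.Dict.mk ((s₀, l₀) :: F'.map (fun p => (p.2, p.1)))).erase s₀
              = PySem.Dict.mk (F'.map (fun p => (p.2, p.1))) := by
            simp only [PySem.Dict.erase, List.filter_cons, beq_self_eq_true, Bool.not_true]
            congr 1
            refine List.filter_eq_self.mpr ?_
            intro x hx
            rcases List.mem_map.mp hx with ⟨q, hq, hqx⟩
            have : q.2 ≠ s₀ := fun h => hdup (List.mem_map.mpr ⟨q, hq, h⟩)
            simp [← hqx, this]
          have hchase : pyChase (PySem.Dict.mk ((s₀, l₀) :: F'.map (fun p => (p.2, p.1)))) s₀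
              = if F'.length ≠ 0 ∧ s₀ * l₀ ≤ s₀ then false
                else pyChase (PySem.Dict.mk (F'.map (fun p => (p.2, p.1)))) (s₀ * l₀) := by
            rw [pyChase.eq_def]
            split
            next l hgl =>
              rw [hget] at hgl
              have : l = l₀ := (Option.some_inj.mp hgl).symm
              subst this
              dsimp only
              rw [herase]
              simp [PySem.Dict.size]
            next hgn => rw [hget] at hgn; cases hgn
          have h0' : ∀ p ∈ F', p.2 = 0 → s₀ * l₀ = 1 := by
            intro p hp hp0
            have hle : s₀ ≤ 0 := hp0 ▸ hmin p hp
            have he1 : s₀ = 1 := h0 p (List.mem_cons_of_mem _ hp) hp0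
            omega
          have hIH := ih F'.length (by simp only [List.length_cons] at hlen; omega) F' (s₀ * l₀) rfl hpw'
            (fun p hp => hl1 p (List.mem_cons_of_mem _ hp)) h0'
          simp only [scanF, ne_eq, not_true_eq_false, if_false, List.map_cons]
          by_cases hcond : F'.length ≠ 0 ∧ s₀ * l₀ ≤ s₀
          · have hRfalse : pyChase (PySem.Dict.mk ((s₀, l₀) :: F'.map (fun p => (p.2, p.1)))) s₀
                = false := by rw [hchase, if_pos hcond]
            rw [hRfalse, ite_self]
            obtain ⟨hne0, hle⟩ := hcond
            cases hF' : F' with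
            | nil => rw [hF'] at hne0; simp at hne0
            | cons q F'' =>
              obtain ⟨l₁, s₁⟩ := q
              have hq : (l₁, s₁) ∈ F' := by rw [hF']; exact List.mem_cons_self
              have h1 : s₀ ≤ s₁ := by simpa using hmin (l₁, s₁) hq
              have hs : s₁ ≠ s₀ := fun h => hdup (List.mem_map.mpr ⟨(l₁, s₁), hq, h⟩)
              have hne : s₁ ≠ s₀ * l₀ := by omega
              simp [scanF, hne]
          · rw [hchase, if_neg hcond]
            by_cases hnd' : (F'.map (·.2)).Nodup
            · rw [if_pos (by simp [hnd', hdup])]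
              rw [hIH, if_pos hnd']
            · rw [if_neg (by simp [hnd'])]
              rw [hIH, if_neg hnd']
      · simp only [scanF, ne_eq, hse, not_false_eq_true, if_true]
        by_cases hnd : (((l₀, s₀) :: F').map (·.2)).Nodup
        · rw [if_pos hnd]
          symm
          refine pyChase_stuck (PySem.Dict.mk (((l₀, s₀) :: F').map (fun p => (p.2, p.1)))).size
            _ e s₀ rfl ?_ ?_ (fun h => hse h.symm)
          · exact List.mem_map.mpr ⟨(s₀, l₀), by simp, rfl⟩
          · intro p hp
            rcases List.mem_map.mp hp with ⟨q, hq, hqp⟩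
            rcases List.mem_cons.mp hq with hq' | hq'
            · simp [← hqp, hq']
            · have := hmin q hq'
              simp [← hqp]
              omega
        · rw [if_neg hnd]

-- ===== VERDICT (by name: the statement is the Claim_ definition above) =====
theorem eval_is_non_overlapping_and_dense_py_spec : Claim_equal_eval_is_non_overlapping_and_dense_py := by
  intro sizes strides _ _
  unfold Spec_eval_is_non_overlapping_and_dense_py
  unfold eval_is_non_overlapping_and_dense_py eval_is_non_overlapping_and_dense_py_alt
  by_cases hdim : sizes.length = 1
  · rw [if_pos hdim, if_pos hdim]
    match sizes, hdim with
    | [a], _ =>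
      have ha : PySem.List.pyGet? [a] (0 : Int) = some a := rfl
      rw [ha]
      cases PySem.List.pyGet? strides (0 : Int) <;> rfl
  · rw [if_neg hdim, if_neg hdim]
    rw [pyScanA_eq_scanF]
    have hpwS : ((PySem.List.sorted (sizes.zip strides) (fun p => p.2) false).filter
        (fun p => p.1 != 1)).Pairwise (fun a b => a.2 ≤ b.2) :=
      List.Pairwise.sublist (List.filter_sublist) (PySem.List.sorted_pairwise _ _)
    have hl1 : ∀ p ∈ (PySem.List.sorted (sizes.zip strides) (fun p => p.2) false).filter
        (fun p => p.1 != 1), p.1 ≠ 1 := by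
      intro p hp
      simpa using (List.mem_filter.mp hp).2
    have hmain := scanF_eq_chase ((PySem.List.sorted (sizes.zip strides) (fun p => p.2)
        false).filter (fun p => p.1 != 1)).length _ 1 rfl hpwS hl1 (fun _ _ _ => rfl)
    rw [hmain]
    have hperm : ((PySem.List.sorted (sizes.zip strides) (fun p => p.2) false).filter
        (fun p => p.1 != 1)).Perm ((sizes.zip strides).filter (fun p => p.1 != 1)) :=
      (PySem.List.sorted_perm _ _ _).filter _
    cases hb : pyBuildTable (sizes.zip strides) PySem.Dict.empty with
    | none =>
      have hnn : ¬ (((sizes.zip strides).filter (fun p => p.1 != 1)).map (·.2)).Nodup := by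
        have h := (pyBuildTable_none_iff (sizes.zip strides) PySem.Dict.empty
          (by simp [PySem.Dict.empty, PySem.Dict.keys])).mp hb
        simpa [PySem.Dict.empty, PySem.Dict.keys] using h
      rw [if_neg (fun h => hnn (((hperm.map _).nodup_iff).mp h))]
    | some t =>
      have hnn : (((sizes.zip strides).filter (fun p => p.1 != 1)).map (·.2)).Nodup := by
        by_contra h
        have h2 := (pyBuildTable_none_iff (sizes.zip strides) PySem.Dict.empty
          (by simp [PySem.Dict.empty, PySem.Dict.keys])).mpr
          (by simpa [PySem.Dict.empty, PySem.Dict.keys] using h)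
        rw [hb] at h2
        cases h2
      have hitems : t.items = ((sizes.zip strides).filter (fun p => p.1 != 1)).map
          (fun p => (p.2, p.1)) := by
        have h := pyBuildTable_some_items (sizes.zip strides) PySem.Dict.empty t hb
        simpa [PySem.Dict.empty] using h
      have hndS : (((PySem.List.sorted (sizes.zip strides) (fun p => p.2) false).filter
          (fun p => p.1 != 1)).map (·.2)).Nodup := ((hperm.map _).nodup_iff).mpr hnn
      rw [if_pos hndS]
      refine pyChase_perm (PySem.Dict.mk (((PySem.List.sorted (sizes.zip strides)
        (fun p => p.2) false).filter (fun p => p.1 != 1)).map (fun p => (p.2, p.1)))).size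
        _ _ 1 rfl ?_ ?_
      · rw [hitems]
        exact hperm.map _
      · simpa [List.map_map, Function.comp] using hndS
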